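-- pv_equiv track=rewrite | github.com/FerminAlvarez/LeetCode | 1281-subtract-the-product-and-sum-of-digits-of-an-integer/1281-subtract-the-product-and-sum-of-digits-of-an-integer.py | subtractProductAndSum
-- ===== SOURCE A (Python) =====
-- def subtractProductAndSum(n: int) -> int:
--     divisor = 1
--     suma = 0
--
--     while(n != 0):
--         divisor *= (n % 10)
--         suma += (n % 10)
--         n //= 10
--
--     return divisor - suma
-- ===== SOURCE B (Python) =====
-- def subtractProductAndSum(n: int) -> int:
--     digits = [ord(c) - ord('0') for c in str(n)]
--     product = 1
--     for d in digits:
--         product *= d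
--     return product - sum(digits)
-- ===== Notes on version B (the rewrite author's own statement) =====
-- stated objective: alternative
-- what changed: B reads the digits from the decimal string representation str(n) instead of extracting them arithmetically with modulus and floor division, then reduces the digit list with a product fold and the built-in sum.
-- outside the precondition, e.g. on subtractProductAndSum(0): A returns 1, B returns 0
import Mathlib
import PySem

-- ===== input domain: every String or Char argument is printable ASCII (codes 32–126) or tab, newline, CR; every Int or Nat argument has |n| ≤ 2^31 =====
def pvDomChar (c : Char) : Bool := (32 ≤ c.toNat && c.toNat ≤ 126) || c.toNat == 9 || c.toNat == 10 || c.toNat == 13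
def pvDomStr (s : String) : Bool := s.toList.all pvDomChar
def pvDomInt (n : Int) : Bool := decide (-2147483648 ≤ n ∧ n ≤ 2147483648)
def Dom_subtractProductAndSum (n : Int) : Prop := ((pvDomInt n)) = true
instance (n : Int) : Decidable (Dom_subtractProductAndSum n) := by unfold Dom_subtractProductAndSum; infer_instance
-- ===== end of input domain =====

-- B reads the digits from the decimal string str(n) instead of extracting them
-- arithmetically, then reduces with a product fold and sum (objective: alternative).


-- termination: the quotient shrinks while n is positive
theorem pvFloordivTen_toNat_lt (n : Int) (h : 0 < n) :
    (PySem.Int.floordiv n 10).toNat < n.toNat := by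
  rw [PySem.Int.floordiv_eq_ediv_of_pos (by omega)]
  omega

-- ===== PORT A =====
-- Python's condition is `n != 0`; for n < 0 the loop never terminates (floor division has
-- fixpoint -1), so the totality guard `0 < n` transcribes it on every input where A returns.
def pvALoop (n divisor suma : Int) : Int :=
  if hpos : 0 < n then
    pvALoop (PySem.Int.floordiv n 10) (divisor * PySem.Int.mod n 10) (suma + PySem.Int.mod n 10)
  else divisor - suma
termination_by n.toNat
decreasing_by exact pvFloordivTen_toNat_lt n hpos

def subtractProductAndSum (n : Int) : Int := pvALoop n 1 0

-- ===== PORT B =====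
-- ord(c) - ord('0')  (exact: Char.toNat is the code point)
def pvVal (c : Char) : Int := (c.toNat : Int) - 48

-- digits = [ord(c) - ord('0') for c in str(n)]; product loop; product - sum(digits)
def subtractProductAndSum_alt (n : Int) : Int :=
  let digits := (PySem.Int.toStr n).toList.map pvVal
  (digits.foldl (· * ·) 1) - digits.sum

-- ===== PRECONDITION & SPEC =====
-- Pre_ excludes n < 0, where A's while-loop never terminates (floor division stalls
-- at minus one), and the defensible corner n = 0, where A yields its empty product
-- while B reads the single digit of str(0) — both readings of "digits of 0" are defensible.
def Pre_subtractProductAndSum (n : Int) : Prop := 0 < n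
instance (n : Int) : Decidable (Pre_subtractProductAndSum n) := by
  unfold Pre_subtractProductAndSum; infer_instance

def pvWitness_subtractProductAndSum : Int := 7

def Spec_subtractProductAndSum (n : Int) (out : Int) : Prop := out = subtractProductAndSum_alt n
instance (n : Int) (out : Int) : Decidable (Spec_subtractProductAndSum n out) := by
  unfold Spec_subtractProductAndSum; infer_instance

-- ===== CLAIM (what is proved, stated in full; the proofs are below) =====
def Claim_equal_subtractProductAndSum : Prop :=
  ∀ (n : Int), Dom_subtractProductAndSum n → Pre_subtractProductAndSum n →
    Spec_subtractProductAndSum n (subtractProductAndSum n)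

-- ===== LEMMAS AND PROOFS =====

-- proof-only characterisations: product and sum of the decimal digits of m
def pvP (m : Nat) : Int :=
  if _ : m < 10 then (m : Int) else pvP (m / 10) * ((m % 10 : Nat) : Int)
termination_by m
decreasing_by exact Nat.div_lt_self (by omega) (by omega)

def pvS (m : Nat) : Int :=
  if _ : m < 10 then (m : Int) else pvS (m / 10) + ((m % 10 : Nat) : Int)
termination_by m
decreasing_by exact Nat.div_lt_self (by omega) (by omega)

-- the chars str produces, characterised recursively
def pvChars (m : Nat) : List Char :=
  if _ : m < 10 then [Nat.digitChar m] else pvChars (m / 10) ++ [Nat.digitChar (m % 10)]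
termination_by m
decreasing_by exact Nat.div_lt_self (by omega) (by omega)

theorem pvALoop_pos (n d s : Int) (h : 0 < n) :
    pvALoop n d s = pvALoop (PySem.Int.floordiv n 10) (d * PySem.Int.mod n 10)
      (s + PySem.Int.mod n 10) := by
  rw [pvALoop]; simp [h]

theorem pvALoop_neg (n d s : Int) (h : ¬ 0 < n) : pvALoop n d s = d - s := by
  rw [pvALoop]; simp [h]

-- A's fused loop computes d * (digit product) - (s + digit sum)
theorem pvALoop_eq (m : Nat) : ∀ (d s : Int), 0 < m →
    pvALoop (m : Int) d s = d * pvP m - (s + pvS m) := by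
  induction m using Nat.strong_induction_on with
  | _ m ih =>
    intro d s hm
    have hdiv : PySem.Int.floordiv (m : Int) 10 = ((m / 10 : Nat) : Int) := by
      exact_mod_cast PySem.Int.floordiv_natCast m 10
    have hmod : PySem.Int.mod (m : Int) 10 = ((m % 10 : Nat) : Int) := by
      exact_mod_cast PySem.Int.mod_natCast m 10
    rw [pvALoop_pos _ _ _ (by exact_mod_cast hm), hdiv, hmod]
    by_cases h10 : m < 10
    · have : m / 10 = 0 := Nat.div_eq_of_lt h10
      rw [this, pvALoop_neg _ _ _ (by omega), pvP, pvS]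
      simp [h10, Nat.mod_eq_of_lt h10]
    · have hq : 0 < m / 10 := Nat.div_pos (by omega) (by omega)
      have hp : pvP m = pvP (m / 10) * ((m % 10 : Nat) : Int) := by
        rw [pvP]; simp [h10]
      have hsm : pvS m = pvS (m / 10) + ((m % 10 : Nat) : Int) := by
        rw [pvS]; simp [h10]
      rw [ih (m / 10) (Nat.div_lt_self (by omega) (by omega)) _ _ hq, hp, hsm]
      ring

theorem pvToDigitsCore_eq (fuel : Nat) : ∀ (m : Nat) (ds : List Char), m < fuel →
    Nat.toDigitsCore 10 fuel m ds = pvChars m ++ ds := by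
  induction fuel with
  | zero => intro m ds h; omega
  | succ k ih =>
    intro m ds h
    rw [Nat.toDigitsCore]
    by_cases hz : m / 10 = 0
    · have h10 : m < 10 := by omega
      rw [pvChars]
      simp [hz, h10, Nat.mod_eq_of_lt h10]
    · have h10 : ¬ m < 10 := by
        intro hc; exact hz (Nat.div_eq_of_lt hc)
      have hlt : m / 10 < k := by
        have := Nat.div_lt_self (show 0 < m by omega) (show 1 < 10 by omega)
        omega
      have hc : pvChars m = pvChars (m / 10) ++ [Nat.digitChar (m % 10)] := by
        rw [pvChars]; simp [h10]
      simp only [hz, if_false]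
      rw [ih (m / 10) _ hlt, hc]
      simp

theorem pvVal_digitChar (k : Nat) (h : k < 10) : pvVal (Nat.digitChar k) = (k : Int) := by
  interval_cases k <;> rfl

theorem pvChars_foldl (m : Nat) : ∀ (a : Int),
    ((pvChars m).map pvVal).foldl (· * ·) a = a * pvP m := by
  induction m using Nat.strong_induction_on with
  | _ m ih =>
    intro a
    by_cases h10 : m < 10
    · rw [pvChars, pvP]
      simp [h10, pvVal_digitChar m h10]
    · have hc : pvChars m = pvChars (m / 10) ++ [Nat.digitChar (m % 10)] := by
        rw [pvChars]; simp [h10]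
      have hp : pvP m = pvP (m / 10) * ((m % 10 : Nat) : Int) := by
        rw [pvP]; simp [h10]
      rw [hc, hp]
      simp only [List.map_append, List.foldl_append]
      rw [ih (m / 10) (Nat.div_lt_self (by omega) (by omega)) a]
      simp [pvVal_digitChar (m % 10) (Nat.mod_lt m (by omega))]
      ring

theorem pvChars_sum (m : Nat) : ((pvChars m).map pvVal).sum = pvS m := by
  induction m using Nat.strong_induction_on with
  | _ m ih =>
    by_cases h10 : m < 10
    · rw [pvChars, pvS]
      simp [h10, pvVal_digitChar m h10]
    · have hc : pvChars m = pvChars (m / 10) ++ [Nat.digitChar (m % 10)] := by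
        rw [pvChars]; simp [h10]
      have hsm : pvS m = pvS (m / 10) + ((m % 10 : Nat) : Int) := by
        rw [pvS]; simp [h10]
      rw [hc, hsm]
      simp only [List.map_append, List.sum_append]
      rw [ih (m / 10) (Nat.div_lt_self (by omega) (by omega))]
      simp [pvVal_digitChar (m % 10) (Nat.mod_lt m (by omega))]

-- ===== VERDICT (by name: the statement is the Claim_ definition above) =====
theorem subtractProductAndSum_spec : Claim_equal_subtractProductAndSum := by
  intro n _ hpre
  have hpos : 0 < n := hpre
  show subtractProductAndSum n = subtractProductAndSum_alt n
  have hm : 0 < n.toNat := by omega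
  have hcast : ((n.toNat : Nat) : Int) = n := Int.toNat_of_nonneg (by omega)
  have hstr : (PySem.Int.toStr n).toList = pvChars n.toNat := by
    rw [PySem.Int.toList_toStr]
    unfold PySem.Int.toChars
    rw [if_neg (by omega)]
    rw [Nat.toDigits, pvToDigitsCore_eq (n.toNat + 1) n.toNat [] (by omega)]
    simp
  simp only [subtractProductAndSum, subtractProductAndSum_alt, hstr]
  conv_lhs => rw [← hcast]
  rw [pvALoop_eq n.toNat 1 0 hm, pvChars_foldl n.toNat 1, pvChars_sum n.toNat]
  ring
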